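-- pv_equiv track=rewrite | github.com/YOUMBORA/algorithm | 23y02m/22th/성현_베스트앨범.py | solution
-- ===== SOURCE A (Python) =====
-- def solution(genres, plays):
--     d1 = {}
--     d2 = {}
--     for i, (g,p) in enumerate(zip(genres, plays)):
--         d1[g] = d1.get(g,[])+[(i,p)]
--         d2[g] = d2.get(g,0)+p
--     answer = []
--     for k, v in sorted(d2.items(), key= lambda x : x[1], reverse=True):
--         for a in sorted(d1[k], key= lambda x : x[1], reverse=True)[:2]:
--             answer.append(a[0])
--     return answer
-- ===== SOURCE B (Python) =====
-- def _push(b, s, i, p):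
--     if b is None or p > b[1]:
--         return (i, p), b
--     if s is None or p > s[1]:
--         return b, (i, p)
--     return b, s
--
-- def solution(genres, plays):
--     stats = {}
--     for i, (g, p) in enumerate(zip(genres, plays)):
--         total, b, s = stats.get(g, (0, None, None))
--         b, s = _push(b, s, i, p)
--         stats[g] = (total + p, b, s)
--     answer = []
--     for _, (_, b, s) in sorted(stats.items(), key=lambda kv: kv[1][0], reverse=True):
--         for e in (b, s):
--             if e is not None:
--                 answer.append(e[0])
--     return answer
-- ===== Notes on version B (the rewrite author's own statement) =====
-- stated objective: faster
-- what changed: Instead of collecting all (index,play) pairs per genre (with copy-on-append list concatenation) and running a full descending sort inside every genre, B streams over the songs once keeping, per genre, only a running total and the best-two (index,play) entries updated by constant-time comparisons, then only sorts the genre summaries by total; no per-song sort ever happens.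
import Mathlib
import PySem

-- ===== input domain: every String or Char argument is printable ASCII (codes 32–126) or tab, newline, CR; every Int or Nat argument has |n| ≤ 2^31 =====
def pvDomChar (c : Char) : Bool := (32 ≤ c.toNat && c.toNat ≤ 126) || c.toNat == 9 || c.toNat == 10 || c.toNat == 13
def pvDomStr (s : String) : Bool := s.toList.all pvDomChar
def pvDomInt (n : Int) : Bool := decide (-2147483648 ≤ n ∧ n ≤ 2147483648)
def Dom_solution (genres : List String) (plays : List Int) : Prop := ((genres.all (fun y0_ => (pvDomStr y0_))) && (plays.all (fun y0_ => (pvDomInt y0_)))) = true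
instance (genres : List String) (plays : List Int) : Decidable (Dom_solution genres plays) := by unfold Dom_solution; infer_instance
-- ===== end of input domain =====

-- B replaces A's per-genre buckets + per-genre descending sorts by a single streaming pass that
-- keeps, per genre, only the running total and the best-two (index,play) entries; only the genre
-- summaries are sorted at the end (measured faster in a timing run).

-- ===== PORT A =====
-- literal port of A; Python's d1[k] is read via getD (k is always a key of d1, so no KeyError occurs)
def solution (genres : List String) (plays : List Int) : List Int :=
  let step := fun (st : PySem.Dict String (List (Int × Int)) × PySem.Dict String Int) (e : Int × (String × Int)) =>
    (st.1.insert e.2.1 (st.1.getD e.2.1 [] ++ [(e.1, e.2.2)]),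
     st.2.insert e.2.1 (st.2.getD e.2.1 0 + e.2.2))
  let st := (PySem.List.enumerate (genres.zip plays)).foldl step (PySem.Dict.empty, PySem.Dict.empty)
  (PySem.List.sorted st.2.items (fun x => x.2) true).foldl
    (fun ans kv =>
      ((PySem.List.sorted (st.1.getD kv.1 []) (fun x => x.2) true).take 2).foldl
        (fun a x => a ++ [x.1]) ans) []

-- ===== PORT B =====
-- port of Source B's helper _push: update the (best, second) pair of a genre with a new (i, p) song
def top2upd (b s : Option (Int × Int)) (i p : Int) : Option (Int × Int) × Option (Int × Int) :=
  match b with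
  | none => (some (i, p), b)
  | some bb =>
    if bb.2 < p then (some (i, p), b)
    else
      match s with
      | none => (b, some (i, p))
      | some ss => if ss.2 < p then (b, some (i, p)) else (b, s)

-- literal port of Source B: one streaming pass building per-genre (total, best, second), then one sort
-- of the genre summaries by total
def solution_alt (genres : List String) (plays : List Int) : List Int :=
  let stats := (PySem.List.enumerate (genres.zip plays)).foldl
    (fun (stats : PySem.Dict String (Int × (Option (Int × Int) × Option (Int × Int))))
         (e : Int × (String × Int)) =>
      stats.insert e.2.1
        ((stats.getD e.2.1 (0, (none, none))).1 + e.2.2,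
         top2upd (stats.getD e.2.1 (0, (none, none))).2.1
                 (stats.getD e.2.1 (0, (none, none))).2.2 e.1 e.2.2))
    PySem.Dict.empty
  (PySem.List.sorted stats.items (fun kv => kv.2.1) true).foldl
    (fun answer kv =>
      (answer ++ (match kv.2.2.1 with | some b => [b.1] | none => []))
        ++ (match kv.2.2.2 with | some s => [s.1] | none => []))
    []

-- ===== PRECONDITION & SPEC =====
def Spec_solution (genres : List String) (plays : List Int) (out : List Int) : Prop := out = solution_alt genres plays
instance (genres : List String) (plays : List Int) (out : List Int) : Decidable (Spec_solution genres plays out) := by unfold Spec_solution; infer_instance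

-- ===== CLAIM (what is proved, stated in full; the proofs are below) =====
def Claim_equal_solution : Prop := ∀ (genres : List String) (plays : List Int), Dom_solution genres plays → Spec_solution genres plays (solution genres plays)

-- ===== LEMMAS AND PROOFS =====

-- the ≤2-element list a (best, second) state encodes
def pvEnc (bs : Option (Int × Int) × Option (Int × Int)) : List (Int × Int) :=
  match bs with
  | (none, _) => []
  | (some b, none) => [b]
  | (some b, some s) => [b, s]

-- grouping loop, value at one key: the per-key fold over the matching elements
theorem pv_fold_getD {α ν : Type} (f : α → String) (upd : ν → α → ν) (dflt : ν)
    (l : List α) (d : PySem.Dict String ν) (g : String) :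
    (l.foldl (fun d x => d.insert (f x) (upd (d.getD (f x) dflt) x)) d).getD g dflt =
      (l.filter (fun x => f x == g)).foldl upd (d.getD g dflt) := by
  induction l generalizing d with
  | nil => rfl
  | cons x t ih =>
    rw [List.foldl_cons, ih, List.filter_cons]
    by_cases h : f x = g
    · simp [h]
    · have hb : (f x == g) = false := by simpa using h
      simp [PySem.Dict.getD_insert, hb, Ne.symm h]

-- the first n entries of an insertion depend only on the first n entries of the target
theorem pv_take_insertBy {α : Type} (c : α → α → Bool) (x : α) (l : List α) (n : Nat) :
    (PySem.List.insertBy c x l).take n = (PySem.List.insertBy c x (l.take n)).take n := by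
  induction l generalizing n with
  | nil => simp
  | cons a t ih =>
    cases n with
    | zero => simp
    | succ m =>
      by_cases h : c x a = true
      · simp only [PySem.List.insertBy, h, if_true, List.take_succ_cons]
        rw [show a :: List.take m t = List.take (m + 1) (a :: t) from rfl, List.take_take]
        rw [Nat.min_eq_left (Nat.le_succ m)]
      · simp only [PySem.List.insertBy, h, if_false, List.take_succ_cons, Bool.false_eq_true]
        rw [ih]

theorem pv_take2_foldl {α : Type} (c : α → α → Bool) (m : List α) (acc : List α) :
    (m.foldl (fun a z => PySem.List.insertBy c z a) acc).take 2 =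
      m.foldl (fun a z => (PySem.List.insertBy c z a).take 2) (acc.take 2) := by
  induction m generalizing acc with
  | nil => rfl
  | cons z t ih =>
    rw [List.foldl_cons, List.foldl_cons, ih, pv_take_insertBy]

-- one streaming update = insert into the encoded ≤2-list, truncated to 2
theorem pv_enc_step (bs : Option (Int × Int) × Option (Int × Int)) (z : Int × Int) :
    pvEnc (top2upd bs.1 bs.2 z.1 z.2) =
      (PySem.List.insertBy (fun a b => decide (b.2 < a.2)) z (pvEnc bs)).take 2 := by
  obtain ⟨b, s⟩ := bs
  cases b with
  | none => cases s <;> simp [top2upd, pvEnc, PySem.List.insertBy]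
  | some bb =>
    cases s with
    | none =>
      by_cases h : bb.2 < z.2 <;>
        simp [top2upd, pvEnc, PySem.List.insertBy, h]
    | some ss =>
      by_cases h : bb.2 < z.2
      · simp [top2upd, pvEnc, PySem.List.insertBy, h]
      · by_cases h2 : ss.2 < z.2 <;>
          simp [top2upd, pvEnc, PySem.List.insertBy, h, h2]

theorem pv_enc_foldl (m : List (Int × Int)) (bs0 : Option (Int × Int) × Option (Int × Int)) :
    pvEnc (m.foldl (fun bs z => top2upd bs.1 bs.2 z.1 z.2) bs0) =
      m.foldl (fun a z => (PySem.List.insertBy (fun a b => decide (b.2 < a.2)) z a).take 2) (pvEnc bs0) := by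
  induction m generalizing bs0 with
  | nil => rfl
  | cons z t ih => rw [List.foldl_cons, List.foldl_cons, ih, pv_enc_step]

-- the streaming (best, second) state IS the first two entries of the stable descending sort
theorem pv_enc_sorted (m : List (Int × Int)) :
    pvEnc (m.foldl (fun bs z => top2upd bs.1 bs.2 z.1 z.2) (none, none)) =
      (PySem.List.sorted m (fun x => x.2) true).take 2 := by
  rw [PySem.List.sorted_rev_eq_foldl_insertBy, pv_take2_foldl, pv_enc_foldl]
  rfl

-- reachable states never have a second entry without a first
theorem pv_good_top2upd (b s : Option (Int × Int)) (i p : Int) :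
    (top2upd b s i p).1 ≠ none := by
  cases b with
  | none => simp [top2upd]
  | some bb =>
    by_cases h : bb.2 < p
    · simp [top2upd, h]
    · cases s with
      | none => simp [top2upd, h]
      | some ss => by_cases h2 : ss.2 < p <;> simp [top2upd, h, h2]

theorem pv_good_fold (m : List (Int × Int)) (bs0 : Option (Int × Int) × Option (Int × Int))
    (h : bs0.1 = none → bs0.2 = none) :
    ((m.foldl (fun bs z => top2upd bs.1 bs.2 z.1 z.2) bs0).1 = none →
      (m.foldl (fun bs z => top2upd bs.1 bs.2 z.1 z.2) bs0).2 = none) := by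
  induction m generalizing bs0 with
  | nil => exact h
  | cons z t ih =>
    rw [List.foldl_cons]
    exact ih _ (fun hn => absurd hn (pv_good_top2upd _ _ _ _))

-- B's two emitted chunks are the encoded list's indices
theorem pv_chunk (bs : Option (Int × Int) × Option (Int × Int))
    (h : bs.1 = none → bs.2 = none) :
    (match bs.1 with | some b => [b.1] | none => ([] : List Int))
      ++ (match bs.2 with | some s => [s.1] | none => []) = (pvEnc bs).map (fun x => x.1) := by
  obtain ⟨b, s⟩ := bs
  cases b with
  | none => simp at h; simp [h, pvEnc]
  | some bb => cases s <;> simp [pvEnc]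

theorem pv_insertBy_map {α β : Type} (c : β → β → Bool) (f : α → β) (x : α) (l : List α) :
    PySem.List.insertBy c (f x) (l.map f) =
      (PySem.List.insertBy (fun a b => c (f a) (f b)) x l).map f := by
  induction l with
  | nil => rfl
  | cons a t ih =>
    by_cases h : c (f x) (f a) = true <;> simp [PySem.List.insertBy, h, ih]

theorem pv_sorted_map {α β : Type} (key : β → Int) (f : α → β) (xs : List α) :
    PySem.List.sorted (xs.map f) key true =
      (PySem.List.sorted xs (fun x => key (f x)) true).map f := by
  rw [PySem.List.sorted_rev_eq_foldl_insertBy, PySem.List.sorted_rev_eq_foldl_insertBy]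
  suffices H : ∀ (l acc : List α),
      (l.map f).foldl (fun acc y => PySem.List.insertBy (fun a b => decide (key b < key a)) y acc) (acc.map f)
        = (l.foldl (fun acc x => PySem.List.insertBy (fun a b => decide (key (f b) < key (f a)) : α → α → Bool) x acc) acc).map f by
    simpa using H xs []
  intro l
  induction l with
  | nil => intro acc; rfl
  | cons x t ih =>
    intro acc
    simp only [List.map_cons, List.foldl_cons]
    rw [pv_insertBy_map (fun a b => decide (key b < key a)) f x acc]
    exact ih _

theorem pv_insertBy_congr {α : Type} (key key' : α → Int) (x : α) (l : List α)
    (hx : key x = key' x) (h : ∀ y ∈ l, key y = key' y) :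
    PySem.List.insertBy (fun a b => decide (key b < key a)) x l =
      PySem.List.insertBy (fun a b => decide (key' b < key' a)) x l := by
  induction l with
  | nil => rfl
  | cons a t ih =>
    have ha : key a = key' a := h a (by simp)
    have ht : ∀ y ∈ t, key y = key' y := fun y hy => h y (by simp [hy])
    by_cases hc : key a < key x
    · simp [PySem.List.insertBy, hc, ha ▸ hx ▸ hc]
    · simp [PySem.List.insertBy, hc, ha ▸ hx ▸ hc, ih ht]

theorem pv_sorted_congr {α : Type} (key key' : α → Int) (xs : List α)
    (h : ∀ x ∈ xs, key x = key' x) :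
    PySem.List.sorted xs key true = PySem.List.sorted xs key' true := by
  rw [PySem.List.sorted_rev_eq_foldl_insertBy, PySem.List.sorted_rev_eq_foldl_insertBy]
  suffices H : ∀ (l acc : List α), (∀ x ∈ l, key x = key' x) → (∀ y ∈ acc, key y = key' y) →
      l.foldl (fun acc x => PySem.List.insertBy (fun a b => decide (key b < key a)) x acc) acc
        = l.foldl (fun acc x => PySem.List.insertBy (fun a b => decide (key' b < key' a)) x acc) acc by
    exact H xs [] h (by simp)
  intro l
  induction l with
  | nil => intro acc _ _; rfl
  | cons x t ih =>
    intro acc hl hacc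
    have hx : key x = key' x := hl x (by simp)
    have ht : ∀ y ∈ t, key y = key' y := fun y hy => hl y (by simp [hy])
    simp only [List.foldl_cons]
    rw [pv_insertBy_congr key key' x acc hx hacc]
    apply ih _ ht
    intro y hy
    rcases (PySem.List.mem_insertBy _ _ _ _).mp hy with rfl | hy
    · exact hx
    · exact hacc y hy

-- ===== VERDICT (by name: the statement is the Claim_ definition above) =====
theorem solution_spec : Claim_equal_solution := by
  intro genres plays _
  unfold Spec_solution
  simp only [solution, solution_alt]
  rw [PySem.List.foldl_prod_mk
        (fun (d : PySem.Dict String (List (Int × Int))) (e : Int × (String × Int)) =>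
          d.insert e.2.1 (d.getD e.2.1 [] ++ [(e.1, e.2.2)]))
        (fun (d : PySem.Dict String Int) (e : Int × (String × Int)) =>
          d.insert e.2.1 (d.getD e.2.1 0 + e.2.2))]
  set E := PySem.List.enumerate (genres.zip plays) with hE
  set d1 := E.foldl (fun (d : PySem.Dict String (List (Int × Int))) e =>
      d.insert e.2.1 (d.getD e.2.1 [] ++ [(e.1, e.2.2)])) PySem.Dict.empty with hd1
  set d2 := E.foldl (fun (d : PySem.Dict String Int) e =>
      d.insert e.2.1 (d.getD e.2.1 0 + e.2.2)) PySem.Dict.empty with hd2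
  set stats := E.foldl
    (fun (stats : PySem.Dict String (Int × (Option (Int × Int) × Option (Int × Int)))) e =>
      stats.insert e.2.1
        ((stats.getD e.2.1 (0, (none, none))).1 + e.2.2,
         top2upd (stats.getD e.2.1 (0, (none, none))).2.1
                 (stats.getD e.2.1 (0, (none, none))).2.2 e.1 e.2.2))
    PySem.Dict.empty with hstats
  -- both dicts have the same key list
  have hK : stats.keys = d2.keys := by
    rw [hstats, hd2,
      PySem.Dict.keys_foldl_insert_key E (fun (e : Int × (String × Int)) => e.2.1) _ _,
      PySem.Dict.keys_foldl_insert_key E (fun (e : Int × (String × Int)) => e.2.1) _ _]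
    simp [PySem.Dict.keys_empty]
  have hnd2 : d2.keys.Nodup := by
    rw [hd2]; exact PySem.Dict.nodup_keys_foldl_insert_key _ _ _ _ (by simp)
  have hndS : stats.keys.Nodup := by
    rw [hstats]; exact PySem.Dict.nodup_keys_foldl_insert_key _ _ _ _ (by simp)
  -- per-key values
  have hstatsD : ∀ g, stats.getD g (0, (none, none)) =
      ((E.filter (fun e => e.2.1 == g)).foldl (fun v e => v + e.2.2) 0,
       (E.filter (fun e => e.2.1 == g)).foldl (fun bs e => top2upd bs.1 bs.2 e.1 e.2.2) (none, none)) := by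
    intro g
    rw [hstats,
      pv_fold_getD (fun (e : Int × (String × Int)) => e.2.1)
        (fun (t : Int × (Option (Int × Int) × Option (Int × Int))) e =>
          (t.1 + e.2.2, top2upd t.2.1 t.2.2 e.1 e.2.2)) (0, (none, none)) E PySem.Dict.empty g,
      PySem.Dict.getD_empty]
    exact PySem.List.foldl_prod_mk (fun v (e : Int × (String × Int)) => v + e.2.2)
      (fun (bs : Option (Int × Int) × Option (Int × Int)) (e : Int × (String × Int)) =>
        top2upd bs.1 bs.2 e.1 e.2.2) _ 0 (none, none)
  have hd2D : ∀ g, d2.getD g 0 = (stats.getD g (0, (none, none))).1 := by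
    intro g
    rw [hstatsD g, hd2,
      pv_fold_getD (fun (e : Int × (String × Int)) => e.2.1)
        (fun v e => v + e.2.2) 0 E PySem.Dict.empty g, PySem.Dict.getD_empty]
  have hd1D : ∀ g, d1.getD g [] =
      (E.filter (fun e => e.2.1 == g)).map (fun e => (e.1, e.2.2)) := by
    intro g
    rw [hd1,
      pv_fold_getD (fun (e : Int × (String × Int)) => e.2.1)
        (fun a e => a ++ [(e.1, e.2.2)]) [] E PySem.Dict.empty g, PySem.Dict.getD_empty,
      PySem.List.foldl_append_singleton_eq_map (fun (e : Int × (String × Int)) => (e.1, e.2.2))]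
    simp
  -- rewrite both items lists through the common key list
  rw [PySem.Dict.items_eq_map_keys d2 hnd2 0,
      PySem.Dict.items_eq_map_keys stats hndS (0, (none, none)), hK]
  rw [pv_sorted_map (fun (x : String × Int) => x.2) (fun k => (k, d2.getD k 0)) d2.keys]
  rw [pv_sorted_map (fun (x : String × (Int × (Option (Int × Int) × Option (Int × Int)))) => x.2.1)
        (fun k => (k, stats.getD k (0, (none, none)))) d2.keys]
  rw [pv_sorted_congr (fun k => d2.getD k 0) (fun k => (stats.getD k (0, (none, none))).1) d2.keys
        (fun g _ => hd2D g)]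
  rw [List.foldl_map, List.foldl_map]
  apply PySem.List.foldl_congr_mem
  intro acc g _
  -- A's inner loop for genre g  =  B's two chunks for genre g
  rw [PySem.List.foldl_append_singleton_eq_map (fun (x : Int × Int) => x.1)]
  dsimp only
  have hmap : ((E.filter (fun e => e.2.1 == g)).foldl
      (fun (bs : Option (Int × Int) × Option (Int × Int)) e => top2upd bs.1 bs.2 e.1 e.2.2) (none, none))
      = ((E.filter (fun e => e.2.1 == g)).map (fun e => (e.1, e.2.2))).foldl
          (fun bs z => top2upd bs.1 bs.2 z.1 z.2) (none, none) := by
    rw [List.foldl_map]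
  rw [List.append_assoc,
      pv_chunk _ (by
        rw [hstatsD g]
        show ((E.filter (fun e => e.2.1 == g)).foldl
            (fun (bs : Option (Int × Int) × Option (Int × Int)) e =>
              top2upd bs.1 bs.2 e.1 e.2.2) (none, none)).1 = none → _
        rw [hmap]
        exact pv_good_fold _ (none, none) (fun _ => rfl)),
      hd1D g, hstatsD g]
  dsimp only
  rw [hmap, pv_enc_sorted, List.map_take]
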